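-- pv_equiv track=rewrite | github.com/SohaibAamir28/CALICO-Fall-24-contest | bridgeb1.py | solve
-- ===== SOURCE A (Python) =====
-- def solve(B: int, N: int, S: list) -> int:
--     '''
--     Return the height H in which the danger is minimized and satisfies the budget constraints.
--     '''
--     min_height = min(S)
--     max_height = max(S)
--     best_height = -1
--     min_danger = float('inf')
--     min_cost = float('inf')
--
--     for h in range(min_height, max_height + 1):
--         danger = sum(h - s for s in S if s < h)
--         cost = sum(s - h for s in S if s > h)
--
--         if cost <= B:
--             if danger < min_danger or (danger == min_danger and cost < min_cost):
--                 min_danger = danger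
--                 min_cost = cost
--                 best_height = h
--
--     return best_height
-- ===== SOURCE B (Python) =====
-- def solve(B: int, N: int, S: list) -> int:
--     '''
--     Return the height H in which the danger is minimized and satisfies the budget constraints.
--
--     Since danger is strictly increasing and cost non-increasing in h, the answer is
--     simply the smallest h in [min(S), max(S)] with cost(h) <= B (or -1 if none):
--     find it by binary search instead of scanning every height.
--     '''
--     lo = min(S)
--     hi = max(S)
--
--     def cost(h):
--         return sum(s - h for s in S if s > h)
--
--     if cost(hi) > B:
--         return -1
--     while lo < hi:
--         mid = (lo + hi) // 2
--         if cost(mid) <= B: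
--             hi = mid
--         else:
--             lo = mid + 1
--     return lo
-- ===== Notes on version B (the rewrite author's own statement) =====
-- stated objective: faster
-- what changed: Instead of scanning every height in [min(S), max(S)] and maintaining the running (danger, cost) minimum, B observes that danger is strictly increasing and cost non-increasing in h, so the answer is the smallest feasible height; it finds it by binary search over the height range.
import Mathlib
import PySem

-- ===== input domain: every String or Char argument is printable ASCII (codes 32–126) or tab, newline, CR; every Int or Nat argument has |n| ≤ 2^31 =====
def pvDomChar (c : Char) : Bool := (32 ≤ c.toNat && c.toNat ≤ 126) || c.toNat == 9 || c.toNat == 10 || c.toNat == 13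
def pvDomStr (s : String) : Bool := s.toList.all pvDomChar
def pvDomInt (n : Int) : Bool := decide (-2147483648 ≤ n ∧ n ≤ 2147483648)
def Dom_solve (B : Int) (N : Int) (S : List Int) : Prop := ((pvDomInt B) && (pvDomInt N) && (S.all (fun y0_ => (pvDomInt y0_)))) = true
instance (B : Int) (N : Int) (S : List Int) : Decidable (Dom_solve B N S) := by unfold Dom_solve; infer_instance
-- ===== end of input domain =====

-- B replaces A's linear scan over every height in [min(S), max(S)] by a binary search
-- for the smallest height whose cost fits the budget (faster: O(N log range) vs O(N * range)).

-- ===== PORT A =====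
-- danger = sum(h - s for s in S if s < h)
def dangerOf (S : List Int) (h : Int) : Int :=
  ((S.filter (fun s => s < h)).map (fun s => h - s)).sum

-- cost = sum(s - h for s in S if s > h)
def costOf (S : List Int) (h : Int) : Int :=
  ((S.filter (fun s => h < s)).map (fun s => s - h)).sum

-- 'x < min_danger' / 'x == min_danger' / 'x < min_cost' where none encodes float('inf')
def ltInf (x : Int) (o : Option Int) : Bool :=
  match o with | none => true | some y => x < y

def eqInf (x : Int) (o : Option Int) : Bool :=
  match o with | none => false | some y => x == y

-- one iteration of A's for-loop; state = (best_height, min_danger, min_cost)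
def stepA (B : Int) (S : List Int) (st : Int × Option Int × Option Int) (h : Int) :
    Int × Option Int × Option Int :=
  let danger := dangerOf S h
  let cost := costOf S h
  if cost ≤ B then
    if ltInf danger st.2.1 || (eqInf danger st.2.1 && ltInf cost st.2.2) then
      (h, some danger, some cost)
    else st
  else st

def solve (B : Int) (N : Int) (S : List Int) : Int :=
  match PySem.List.min? S (fun x => x), PySem.List.max? S (fun x => x) with
  | some mn, some mx =>
      ((PySem.List.pyRange mn (mx + 1) 1).foldl (stepA B S)
        ((-1 : Int), (none : Option Int), (none : Option Int))).1
  | _, _ => 0  -- min() of empty list raises ValueError; excluded by Pre_solve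

-- ===== PORT B =====
-- cost(h) = sum(s - h for s in S if s > h), as the running accumulation sum performs
def costAlt (S : List Int) (h : Int) : Int :=
  S.foldl (fun acc s => if h < s then acc + (s - h) else acc) 0

-- midpoint bounds, needed for bsearch's termination
theorem bsearch_mid_bounds (lo hi : Int) (h : lo < hi) :
    lo ≤ PySem.Int.floordiv (lo + hi) 2 ∧ PySem.Int.floordiv (lo + hi) 2 < hi := by
  constructor
  · rw [PySem.Int.le_floordiv_iff_mul_le (by omega : (0:Int) < 2)]; omega
  · rw [PySem.Int.floordiv_lt_iff_lt_mul (by omega : (0:Int) < 2)]; omega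

-- the while-loop of B
def bsearch (B : Int) (S : List Int) (lo hi : Int) : Int :=
  if hlt : lo < hi then
    let mid := PySem.Int.floordiv (lo + hi) 2
    if costAlt S mid ≤ B then bsearch B S lo mid else bsearch B S (mid + 1) hi
  else lo
termination_by (hi - lo).toNat
decreasing_by
  · have := bsearch_mid_bounds lo hi hlt; omega
  · have := bsearch_mid_bounds lo hi hlt; omega

def solve_alt (B : Int) (N : Int) (S : List Int) : Int :=
  match PySem.List.min? S (fun x => x) with
  | none => 0  -- min() of empty list raises ValueError; excluded by Pre_solve
  | some lo =>
    match PySem.List.max? S (fun x => x) with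
    | none => 0
    | some hi =>
      if B < costAlt S hi then -1
      else bsearch B S lo hi

-- ===== PRECONDITION & SPEC =====
-- A raises ValueError (min of empty sequence) exactly when S is empty.
def Pre_solve (B : Int) (N : Int) (S : List Int) : Prop := S ≠ []
instance (B : Int) (N : Int) (S : List Int) : Decidable (Pre_solve B N S) := by
  unfold Pre_solve; infer_instance

def pvWitness_solve : Int × Int × List Int := (3, 2, [1, 5])

def Spec_solve (B : Int) (N : Int) (S : List Int) (out : Int) : Prop := out = solve_alt B N S
instance (B : Int) (N : Int) (S : List Int) (out : Int) : Decidable (Spec_solve B N S out) := by unfold Spec_solve; infer_instance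

-- ===== CLAIM (what is proved, stated in full; the proofs are below) =====
def Claim_equal_solve : Prop := ∀ (B : Int) (N : Int) (S : List Int), Dom_solve B N S → Pre_solve B N S → Spec_solve B N S (solve B N S)

-- ===== LEMMAS AND PROOFS =====

theorem costAlt_foldl (S : List Int) (h : Int) (acc : Int) :
    S.foldl (fun acc s => if h < s then acc + (s - h) else acc) acc = acc + costOf S h := by
  induction S generalizing acc with
  | nil => simp [costOf]
  | cons a t ih =>
      simp only [List.foldl_cons]
      by_cases hc : h < a
      · rw [if_pos hc, ih]
        simp [costOf, hc]; ring
      · rw [if_neg hc, ih]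
        simp [costOf, hc]

theorem costAlt_eq_costOf (S : List Int) (h : Int) : costAlt S h = costOf S h := by
  rw [costAlt, costAlt_foldl]; ring

theorem costOf_eq_sum_max (S : List Int) (h : Int) :
    costOf S h = (S.map (fun s => max (s - h) 0)).sum := by
  induction S with
  | nil => rfl
  | cons a t ih =>
      simp only [costOf, List.filter_cons, List.map_cons, List.sum_cons] at *
      by_cases hc : h < a
      · simp [hc, ih]; omega
      · simp [hc, ih]; omega

theorem dangerOf_eq_sum_max (S : List Int) (h : Int) :
    dangerOf S h = (S.map (fun s => max (h - s) 0)).sum := by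
  induction S with
  | nil => rfl
  | cons a t ih =>
      simp only [dangerOf, List.filter_cons, List.map_cons, List.sum_cons] at *
      by_cases hc : a < h
      · simp [hc, ih]; omega
      · simp [hc, ih]; omega

theorem costOf_antitone (S : List Int) {h1 h2 : Int} (hle : h1 ≤ h2) :
    costOf S h2 ≤ costOf S h1 := by
  rw [costOf_eq_sum_max, costOf_eq_sum_max]
  apply List.sum_le_sum
  intro s _; simp; omega

theorem costOf_nonneg (S : List Int) (h : Int) : 0 ≤ costOf S h := by
  rw [costOf_eq_sum_max]
  apply List.sum_nonneg
  intro x hx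
  simp at hx
  obtain ⟨s, _, rfl⟩ := hx
  omega

theorem costOf_max_eq_zero {S : List Int} {mx : Int} (hmx : ∀ s ∈ S, s ≤ mx) :
    costOf S mx = 0 := by
  rw [costOf_eq_sum_max]
  apply List.sum_eq_zero
  intro x hx; simp at hx; obtain ⟨s, hs, rfl⟩ := hx
  have := hmx s hs; omega

theorem dangerOf_strict {S : List Int} {mn : Int} (hmn : mn ∈ S) {h1 h2 : Int}
    (H1 : mn ≤ h1) (H2 : h1 < h2) : dangerOf S h1 < dangerOf S h2 := by
  rw [dangerOf_eq_sum_max, dangerOf_eq_sum_max]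
  apply List.sum_lt_sum
  · intro s _; simp; omega
  · exact ⟨mn, hmn, by simp; omega⟩

-- invariant of A's loop after the heights in [mn, hEnd) have been processed
def goodState (B : Int) (S : List Int) (mn hEnd : Int) (st : Int × Option Int × Option Int) : Prop :=
  (∃ h0, mn ≤ h0 ∧ h0 < hEnd ∧ costOf S h0 ≤ B ∧
      (∀ h, mn ≤ h → h < h0 → B < costOf S h) ∧
      st = (h0, some (dangerOf S h0), some (costOf S h0)))
  ∨ ((∀ h, mn ≤ h → h < hEnd → B < costOf S h) ∧ st = (-1, none, none))

theorem foldA_good (B : Int) (S : List Int) (mn : Int) (hmn : mn ∈ S) (k : Nat) :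
    goodState B S mn (mn + k)
      ((PySem.List.pyRange mn (mn + k) 1).foldl (stepA B S)
        ((-1 : Int), (none : Option Int), (none : Option Int))) := by
  induction k with
  | zero =>
      rw [PySem.List.pyRange_one_eq_nil (by omega)]
      exact Or.inr ⟨by intro h h1 h2; omega, rfl⟩
  | succ k ih =>
      have hsplit : PySem.List.pyRange mn (mn + (k + 1 : Nat)) 1
          = PySem.List.pyRange mn (mn + k) 1 ++ [mn + k] := by
        have : (mn + (k + 1 : Nat) : Int) = (mn + k) + 1 := by push_cast; ring
        rw [this, PySem.List.pyRange_one_succ_right (by omega)]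
      rw [hsplit, List.foldl_append]
      set st := (PySem.List.pyRange mn (mn + k) 1).foldl (stepA B S)
        ((-1 : Int), (none : Option Int), (none : Option Int)) with hst
      simp only [List.foldl_cons, List.foldl_nil]
      rcases ih with ⟨h0, hh1, hh2, hh3, hh4, hh5⟩ | ⟨hall, hh5⟩
      · -- a best height h0 was already found; the new height does not displace it
        left
        refine ⟨h0, hh1, by push_cast; omega, hh3, hh4, ?_⟩
        rw [hh5]
        have hdlt : dangerOf S h0 < dangerOf S (mn + k) :=
          dangerOf_strict hmn hh1 (by omega)
        simp only [stepA, ltInf, eqInf]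
        split
        · have h1 : (dangerOf S (mn + k) < dangerOf S h0) = False := by simp; omega
          have h2 : (dangerOf S (mn + k) == dangerOf S h0) = false := by simp; omega
          simp [h1, h2]
        · rfl
      · -- nothing feasible so far
        rw [hh5]
        by_cases hc : costOf S (mn + k) ≤ B
        · left
          refine ⟨mn + k, by omega, by push_cast; omega, hc, ?_, ?_⟩
          · intro h hge hlt; exact hall h hge hlt
          · simp [stepA, ltInf, hc]
        · right
          constructor
          · intro h hge hlt
            by_cases heq : h = mn + k
            · subst heq; omega
            · exact hall h hge (by push_cast at hlt ⊢; omega)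
          · simp [stepA, hc]

-- characterization of B's binary search
theorem bsearch_good (B : Int) (S : List Int) :
    ∀ (n : Nat) (lo hi : Int), (hi - lo).toNat = n → lo ≤ hi → costAlt S hi ≤ B →
      lo ≤ bsearch B S lo hi ∧ bsearch B S lo hi ≤ hi ∧
      costAlt S (bsearch B S lo hi) ≤ B ∧
      (∀ h, lo ≤ h → h < bsearch B S lo hi → B < costAlt S h) := by
  intro n
  induction n using Nat.strong_induction_on with
  | _ n ih =>
    intro lo hi hn hle hfeas
    rw [bsearch]
    by_cases hlt : lo < hi
    · simp only [hlt, dif_pos]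
      have hmid := bsearch_mid_bounds lo hi hlt
      by_cases hc : costAlt S (PySem.Int.floordiv (lo + hi) 2) ≤ B
      · simp only [hc, if_pos]
        have := ih ((PySem.Int.floordiv (lo + hi) 2) - lo).toNat (by omega)
          lo (PySem.Int.floordiv (lo + hi) 2) rfl (by omega) hc
        exact ⟨this.1, by omega, this.2.2.1, this.2.2.2⟩
      · simp only [hc, if_neg, not_false_iff]
        have := ih (hi - ((PySem.Int.floordiv (lo + hi) 2) + 1)).toNat (by omega)
          ((PySem.Int.floordiv (lo + hi) 2) + 1) hi rfl (by omega) hfeas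
        refine ⟨by omega, this.2.1, this.2.2.1, ?_⟩
        intro h hge hlth
        by_cases hsmall : h ≤ PySem.Int.floordiv (lo + hi) 2
        · have : costAlt S (PySem.Int.floordiv (lo + hi) 2) ≤ costAlt S h := by
            rw [costAlt_eq_costOf, costAlt_eq_costOf]
            exact costOf_antitone S hsmall
          omega
        · exact this.2.2.2 h (by omega) hlth
    · simp only [hlt, dif_neg, not_false_iff]
      refine ⟨le_refl _, hle, ?_, by intro h h1 h2; omega⟩
      have heq : lo = hi := by omega
      rw [heq]; exact hfeas

-- ===== VERDICT (by name: the statement is the Claim_ definition above) =====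
theorem solve_spec : Claim_equal_solve := by
  intro B N S _ hpre
  unfold Spec_solve solve solve_alt
  obtain ⟨mn, hmn⟩ : ∃ mn, PySem.List.min? S (fun x => x) = some mn := by
    cases hq : PySem.List.min? S (fun x => x) with
    | none => exact absurd ((PySem.List.min?_eq_none_iff S (fun x => x)).mp hq) hpre
    | some m => exact ⟨m, rfl⟩
  obtain ⟨mx, hmx⟩ : ∃ mx, PySem.List.max? S (fun x => x) = some mx := by
    cases hq : PySem.List.max? S (fun x => x) with
    | none => exact absurd ((PySem.List.max?_eq_none_iff S (fun x => x)).mp hq) hpre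
    | some m => exact ⟨m, rfl⟩
  rw [hmn]
  rw [hmx]
  have hmnmem : mn ∈ S := PySem.List.min?_mem hmn
  have hmxmem : mx ∈ S := PySem.List.max?_mem hmx
  have hmnmin : ∀ s ∈ S, mn ≤ s := by
    intro s hs; exact PySem.List.min?_isMin hmn s hs
  have hmxmax : ∀ s ∈ S, s ≤ mx := by
    intro s hs; exact PySem.List.max?_isMax hmx s hs
  have hmnmx : mn ≤ mx := hmnmin mx hmxmem
  have hcmx : costOf S mx = 0 := costOf_max_eq_zero hmxmax
  have hgood := foldA_good B S mn hmnmem (mx + 1 - mn).toNat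
  have hEnd : (mn + ((mx + 1 - mn).toNat : Int)) = mx + 1 := by omega
  rw [hEnd] at hgood
  by_cases hB : B < costAlt S mx
  · -- budget negative: nothing feasible anywhere
    simp only [hB, if_pos]
    rcases hgood with ⟨h0, _, _, hh3, _, hh5⟩ | ⟨_, hh5⟩
    · rw [costAlt_eq_costOf] at hB
      have := costOf_nonneg S h0
      have : costOf S mx ≤ costOf S h0 := by omega
      omega
    · rw [hh5]
  · simp only [hB, if_neg, not_false_iff]
    rw [not_lt] at hB
    have hbs := bsearch_good B S (mx - mn).toNat mn mx rfl hmnmx hB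
    rcases hgood with ⟨h0, hh1, hh2, hh3, hh4, hh5⟩ | ⟨hall, _⟩
    · rw [hh5]
      -- both h0 and bsearch's result are the least feasible height ≥ mn
      set r := bsearch B S mn mx with hr
      by_cases hcmp : h0 < r
      · exfalso
        have := hbs.2.2.2 h0 hh1 hcmp
        rw [costAlt_eq_costOf] at this; omega
      · by_cases hcmp2 : r < h0
        · exfalso
          have := hh4 r hbs.1 hcmp2
          have := hbs.2.2.1
          rw [costAlt_eq_costOf] at *; omega
        · omega
    · exfalso
      rw [costAlt_eq_costOf] at hB
      exact absurd hB (by have := hall mx hmnmx (by omega); omega)
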